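-- pv_equiv track=rewrite | github.com/ToniPaltus/grep | main.py | get_str_nums_before_context
-- ===== SOURCE A (Python) =====
-- def get_str_nums_before_context(str_with_request, before_context):
--     result = []
--     for item in str_with_request:
--         start = item - before_context
--         if start < 1:
--             start = 1
--         end = item - 1
--         for i in range(start, end+1):
--             result.append(i)
--     result = set(result)
--     return list(result)
-- ===== SOURCE B (Python) =====
-- import bisect
--
-- def _cover(ends, covered, s, e):
--     """covered: sorted disjoint non-adjacent closed intervals; ends: parallel list of
--     right endpoints. Returns the numbers of [s, e] not yet covered (increasing) and
--     splices the merged interval into covered/ends in place."""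
--     i = bisect.bisect_left(ends, s - 1)       # first interval with b >= s-1
--     gaps = []
--     cur = s
--     ns, ne = s, e
--     k = i
--     n = len(covered)
--     while k < n and covered[k][0] <= e + 1:
--         a, b = covered[k]
--         if cur < a:
--             gaps.extend(range(cur, min(a, e + 1)))
--         if b + 1 > cur:
--             cur = b + 1
--         if a < ns:
--             ns = a
--         if b > ne:
--             ne = b
--         k += 1
--     if cur <= e:
--         gaps.extend(range(cur, e + 1))
--     covered[i:k] = [(ns, ne)]
--     ends[i:k] = [ne]
--     return gaps
--
-- def get_str_nums_before_context(str_with_request, before_context):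
--     nums = set()
--     covered = []
--     ends = []
--     for item in str_with_request:
--         s = item - before_context
--         if s < 1:
--             s = 1
--         e = item - 1
--         if s > e:
--             continue
--         nums.update(_cover(ends, covered, s, e))
--     return list(nums)
-- ===== Notes on version B (the rewrite author's own statement) =====
-- stated objective: alternative
-- what changed: A enumerates every line of each match's context window and deduplicates the full enumeration with set() at the end; B keeps the covered line numbers as a sorted list of disjoint merged intervals (bisect + splice) and adds only each window's not-yet-covered lines to the result set, so each line is produced once.
import Mathlib
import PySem

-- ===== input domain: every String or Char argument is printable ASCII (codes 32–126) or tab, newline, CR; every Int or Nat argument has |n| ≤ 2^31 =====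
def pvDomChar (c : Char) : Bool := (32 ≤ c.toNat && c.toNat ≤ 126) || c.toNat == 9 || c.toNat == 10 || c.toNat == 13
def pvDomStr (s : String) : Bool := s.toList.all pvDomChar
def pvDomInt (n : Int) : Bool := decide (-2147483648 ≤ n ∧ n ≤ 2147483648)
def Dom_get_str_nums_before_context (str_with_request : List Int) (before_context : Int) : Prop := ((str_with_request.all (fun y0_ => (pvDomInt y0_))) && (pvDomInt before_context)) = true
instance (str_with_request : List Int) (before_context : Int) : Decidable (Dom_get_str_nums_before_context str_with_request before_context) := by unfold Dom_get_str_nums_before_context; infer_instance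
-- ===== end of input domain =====

-- B replaces A's "enumerate every context line per match, then dedup with set()" by an
-- incremental union of disjoint covered intervals (bisect + splice), adding only the
-- not-yet-covered line numbers of each match's context window to the result set.

-- ===== PORT A =====
def get_str_nums_before_context (str_with_request : List Int) (before_context : Int) : List Int :=
  let result : List Int :=
    str_with_request.foldl (fun result item =>
      let start := item - before_context
      let start := if start < 1 then 1 else start
      let endv := item - 1
      -- for i in range(start, end+1): result.append(i)
      (PySem.List.pyRange start (endv + 1) 1).foldl (fun r i => r ++ [i]) result) []
  -- result = set(result); return list(result)
  PySem.Set.ofList result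

-- ===== PORT B =====
-- the while loop of _cover, walking covered[k:] while covered[k][0] <= e+1;
-- returns (gaps, ns, ne, untouched suffix of covered)
def pvCoverMerge : List (Int × Int) → Int → Int → Int → Int → List Int × Int × Int × List (Int × Int)
  | [], cur, e, ns, ne =>
      ((if cur ≤ e then PySem.List.pyRange cur (e + 1) 1 else []), ns, ne, [])
  | (a, b) :: rest, cur, e, ns, ne =>
      if a ≤ e + 1 then
        let g := if cur < a then PySem.List.pyRange cur (min a (e + 1)) 1 else []
        let r := pvCoverMerge rest (if b + 1 > cur then b + 1 else cur) e
                   (if a < ns then a else ns) (if b > ne then b else ne)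
        (g ++ r.1, r.2)
      else
        ((if cur ≤ e then PySem.List.pyRange cur (e + 1) 1 else []), ns, ne, (a, b) :: rest)

-- _cover: bisect on the right endpoints, merge loop, splice covered[i:k] = [(ns, ne)]
def pvCover (covered : List (Int × Int)) (s e : Int) : List Int × List (Int × Int) :=
  let i := PySem.List.bisectLeft (covered.map Prod.snd) (s - 1)
  let r := pvCoverMerge (covered.drop i) s e s e
  (r.1, covered.take i ++ (r.2.1, r.2.2.1) :: r.2.2.2)

def get_str_nums_before_context_alt (str_with_request : List Int) (before_context : Int) : List Int :=
  (str_with_request.foldl (fun (st : List Int × List (Int × Int)) item =>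
      let s := item - before_context
      let s := if s < 1 then 1 else s
      let e := item - 1
      if s > e then st
      else
        let r := pvCover st.2 s e
        (PySem.Set.update st.1 r.1, r.2)) ([], [])).1

-- ===== PRECONDITION & SPEC =====
def Spec_get_str_nums_before_context (str_with_request : List Int) (before_context : Int) (out : List Int) : Prop := out = get_str_nums_before_context_alt str_with_request before_context
instance (str_with_request : List Int) (before_context : Int) (out : List Int) : Decidable (Spec_get_str_nums_before_context str_with_request before_context out) := by unfold Spec_get_str_nums_before_context; infer_instance

-- ===== CLAIM (what is proved, stated in full; the proofs are below) =====
def Claim_equal_get_str_nums_before_context : Prop := ∀ (str_with_request : List Int) (before_context : Int), Dom_get_str_nums_before_context str_with_request before_context → Spec_get_str_nums_before_context str_with_request before_context (get_str_nums_before_context str_with_request before_context)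

-- ===== LEMMAS AND PROOFS =====

-- x is covered by one of the closed intervals of cs
def pvCovB (x : Int) (cs : List (Int × Int)) : Bool := cs.any (fun p => decide (p.1 ≤ x ∧ x ≤ p.2))

-- covered is a sorted list of disjoint, non-adjacent, nonempty closed intervals
def pvGood (cs : List (Int × Int)) : Prop :=
  (∀ p ∈ cs, p.1 ≤ p.2) ∧ cs.Pairwise (fun p q => p.2 + 1 < q.1)


lemma pvCovB_cons (x a b : Int) (rest : List (Int × Int)) :
    pvCovB x ((a, b) :: rest) = (decide (a ≤ x ∧ x ≤ b) || pvCovB x rest) := by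
  simp [pvCovB]

lemma pvCovB_false_of_lt (x : Int) (cs : List (Int × Int)) (h : ∀ q ∈ cs, x < q.1) :
    pvCovB x cs = false := by
  simp only [pvCovB, List.any_eq_false]
  intro p hp
  have := h p hp
  simp; omega

lemma pvCovB_append (x : Int) (cs ds : List (Int × Int)) :
    pvCovB x (cs ++ ds) = (pvCovB x cs || pvCovB x ds) := by
  simp [pvCovB]

lemma pvGuardRange (cur e : Int) :
    (if cur ≤ e then PySem.List.pyRange cur (e + 1) 1 else []) = PySem.List.pyRange cur (e + 1) 1 := by
  split_ifs with h
  · rfl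
  · exact (PySem.List.pyRange_one_eq_nil (by omega)).symm

lemma pvGuardGap (cur a e : Int) :
    (if cur < a then PySem.List.pyRange cur (min a (e + 1)) 1 else []) = PySem.List.pyRange cur (min a (e + 1)) 1 := by
  split_ifs with h
  · rfl
  · exact (PySem.List.pyRange_one_eq_nil (by omega)).symm

-- the core per-interval split of a filtered range
lemma pvFilterSplit (a b e : Int) (hab : a ≤ b) (rest : List (Int × Int))
    (hrest : ∀ q ∈ rest, b + 1 < q.1) :
    ∀ (n : Nat) (cur : Int), (e + 1 - cur).toNat ≤ n →
    (PySem.List.pyRange cur (e + 1) 1).filter (fun x => !pvCovB x ((a, b) :: rest))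
      = PySem.List.pyRange cur (min a (e + 1)) 1
        ++ (PySem.List.pyRange (max cur (b + 1)) (e + 1) 1).filter (fun x => !pvCovB x rest) := by
  intro n
  induction n with
  | zero =>
    intro cur hcur
    have h1 : e + 1 ≤ cur := by omega
    rw [PySem.List.pyRange_one_eq_nil h1,
        PySem.List.pyRange_one_eq_nil (by omega : min a (e+1) ≤ cur),
        PySem.List.pyRange_one_eq_nil (by omega : e + 1 ≤ max cur (b+1))]
    simp
  | succ n ih =>
    intro cur hcur
    by_cases hce : e + 1 ≤ cur
    · rw [PySem.List.pyRange_one_eq_nil hce,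
          PySem.List.pyRange_one_eq_nil (by omega : min a (e+1) ≤ cur),
          PySem.List.pyRange_one_eq_nil (by omega : e + 1 ≤ max cur (b+1))]
      simp
    · -- cur ≤ e
      by_cases hcb : b < cur
      · -- beyond the interval: no gap part, filter over same range with rest
        rw [PySem.List.pyRange_one_eq_nil (by omega : min a (e+1) ≤ cur),
            (by omega : max cur (b+1) = cur)]
        simp only [List.nil_append]
        apply List.filter_congr
        intro x hx
        have hx' := (PySem.List.mem_pyRange_one.mp hx).1
        rw [pvCovB_cons]
        have : decide (a ≤ x ∧ x ≤ b) = false := by simp; omega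
        rw [this]; simp
      · rw [PySem.List.pyRange_one_cons (by omega : cur < e + 1)]
        by_cases hca : cur < a
        · -- gap element
          have hnr : pvCovB cur rest = false := pvCovB_false_of_lt _ _ (by intro q hq; have := hrest q hq; omega)
          rw [List.filter_cons_of_pos (by rw [pvCovB_cons, hnr]; simp; omega)]
          rw [PySem.List.pyRange_one_cons (by omega : cur < min a (e+1)),
              (by omega : max cur (b+1) = b + 1)]
          rw [ih (cur + 1) (by omega)]
          rw [(by omega : max (cur+1) (b+1) = b + 1)]
          simp
        · -- covered by (a,b): a ≤ cur ≤ b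
          rw [List.filter_cons_of_neg (by rw [pvCovB_cons]; simp; omega)]
          rw [ih (cur + 1) (by omega)]
          rw [PySem.List.pyRange_one_eq_nil (by omega : min a (e+1) ≤ cur),
              PySem.List.pyRange_one_eq_nil (by omega : min a (e+1) ≤ cur + 1),
              (by omega : max cur (b+1) = b + 1), (by omega : max (cur+1) (b+1) = b + 1)]





lemma pvMergeSpec :
    ∀ (cs : List (Int × Int)) (cur e ns ne : Int),
    pvGood cs →
    (∀ p ∈ cs, ns ≤ p.2 + 1) →
    (∀ p ∈ cs, ne = e ∨ ne + 1 < p.1) →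
    ns ≤ ne → e ≤ ne →
    (pvCoverMerge cs cur e ns ne).1
        = (PySem.List.pyRange cur (e + 1) 1).filter (fun x => !pvCovB x cs)
    ∧ ∃ merged, cs = merged ++ (pvCoverMerge cs cur e ns ne).2.2.2
        ∧ (∀ x, ((pvCoverMerge cs cur e ns ne).2.1 ≤ x ∧ x ≤ (pvCoverMerge cs cur e ns ne).2.2.1)
              ↔ ((ns ≤ x ∧ x ≤ ne) ∨ pvCovB x merged = true))
        ∧ ((pvCoverMerge cs cur e ns ne).2.1 = ns ∨ ∃ p ∈ merged, (pvCoverMerge cs cur e ns ne).2.1 = p.1)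
        ∧ (∀ q ∈ (pvCoverMerge cs cur e ns ne).2.2.2, (pvCoverMerge cs cur e ns ne).2.2.1 + 1 < q.1) := by
  intro cs
  induction cs with
  | nil =>
    intro cur e ns ne _ _ _ _ _
    refine ⟨?_, [], ?_, ?_, ?_, ?_⟩
    · simp [pvCoverMerge, pvGuardRange, pvCovB]
    · simp [pvCoverMerge]
    · simp [pvCoverMerge, pvCovB]
    · left; trivial
    · simp [pvCoverMerge]
  | cons hd rest ih =>
    obtain ⟨a, b⟩ := hd
    intro cur e ns ne hGood h1 h2 h3 h4
    have hab : a ≤ b := hGood.1 (a, b) (by simp)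
    have hrest1 : ∀ q ∈ rest, b + 1 < q.1 := by
      intro q hq; exact (List.pairwise_cons.mp hGood.2).1 q hq
    have hGoodR : pvGood rest :=
      ⟨fun p hp => hGood.1 p (by simp [hp]), (List.pairwise_cons.mp hGood.2).2⟩
    have hnsb : ns ≤ b + 1 := h1 (a, b) (by simp)
    by_cases hae : a ≤ e + 1
    · -- merge branch
      simp only [pvCoverMerge, if_pos hae]
      set cur' := if b + 1 > cur then b + 1 else cur with hcur'
      set ns₁ := if a < ns then a else ns with hns₁
      set ne₁ := if b > ne then b else ne with hne₁
      have hns₁a : ns₁ ≤ a ∧ ns₁ ≤ ns ∧ (ns₁ = a ∨ ns₁ = ns) := by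
        rw [hns₁]; split_ifs with h <;> omega
      have hne₁a : b ≤ ne₁ ∧ ne ≤ ne₁ ∧ (ne₁ = b ∨ ne₁ = ne) := by
        rw [hne₁]; split_ifs with h <;> omega
      have ihh := ih cur' e ns₁ ne₁ hGoodR
        (by intro p hp; have h5 := hrest1 p hp; have h6 := hGoodR.1 p hp; omega)
        (by intro p hp; have h5 := hrest1 p hp
            rcases hne₁a.2.2 with h | h
            · right; omega
            · rcases h2 p (by simp [hp]) with h' | h' <;> [left; right] <;> omega)
        (by omega) (by omega)
      obtain ⟨hgap, merged', hsplit, hmem, hns', htail⟩ := ihh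
      refine ⟨?_, (a, b) :: merged', by rw [List.cons_append, ← hsplit], ?_, ?_, ?_⟩
      · -- gaps
        rw [pvGuardGap, hgap,
            pvFilterSplit a b e hab rest hrest1 (e + 1 - cur).toNat cur le_rfl]
        have : cur' = max cur (b + 1) := by rw [hcur']; split_ifs <;> omega
        rw [this]
      · intro x
        have hx := hmem x
        rw [pvCovB_cons, hx]
        obtain ⟨hA, hB, hC⟩ := hns₁a
        obtain ⟨hD, hE, hF⟩ := hne₁a
        by_cases hcb : pvCovB x merged' = true
        · simp [hcb]
        · have hcb' : pvCovB x merged' = false := by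
            simpa using hcb
          simp only [hcb', Bool.or_false, Bool.false_eq_true, or_false, decide_eq_true_eq]
          constructor
          · intro h'; omega
          · intro h'; rcases h' with h' | h' <;> omega
      · rcases hns' with h | ⟨p, hp, hpe⟩
        · rcases hns₁a.2.2 with h' | h'
          · right; exact ⟨(a, b), by simp, by rw [h, h']⟩
          · left; rw [h, h']
        · right; exact ⟨p, by simp [hp], hpe⟩
      · exact htail
    · -- stop branch
      simp only [pvCoverMerge, if_neg hae]
      refine ⟨?_, [], ?_, ?_, ?_, ?_⟩
      · rw [pvGuardRange]
        refine ((List.filter_eq_self).mpr ?_).symm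
        intro x hx
        have hx' := PySem.List.mem_pyRange_one.mp hx
        have : pvCovB x ((a, b) :: rest) = false := by
          apply pvCovB_false_of_lt
          intro q hq
          rcases List.mem_cons.mp hq with h | h
          · rw [h]; simp; omega
          · have := hrest1 q h; omega
        simp [this]
      · simp
      · simp [pvCovB]
      · left; trivial
      · intro q hq
        rcases List.mem_cons.mp hq with h | h
        · rcases h2 (a, b) (by simp) with h' | h' <;> (rw [h]; simp; omega)
        · have h5 := hrest1 q h
          rcases h2 q (by simp [h]) with h' | h' <;> omega

lemma pvCovB_false_of_gt (x : Int) (cs : List (Int × Int)) (h : ∀ q ∈ cs, q.2 < x) :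
    pvCovB x cs = false := by
  simp only [pvCovB, List.any_eq_false]; intro p hp; have := h p hp; simp; omega


lemma pvCoverSpec (cov : List (Int × Int)) (s e : Int) (h : pvGood cov) (hse : s ≤ e) :
    (pvCover cov s e).1 = (PySem.List.pyRange s (e + 1) 1).filter (fun x => !pvCovB x cov)
    ∧ pvGood (pvCover cov s e).2
    ∧ ∀ x, pvCovB x (pvCover cov s e).2 = true ↔ (pvCovB x cov = true ∨ (s ≤ x ∧ x ≤ e)) := by
  simp only [pvCover]
  set i := PySem.List.bisectLeft (cov.map Prod.snd) (s - 1) with hi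
  have hpw : (cov.map Prod.snd).Pairwise (· ≤ ·) := by
    rw [List.pairwise_map]
    exact h.2.imp_of_mem (fun {p q} hp hq hr => by have := h.1 q hq; omega)
  obtain ⟨hilen, hlt, hge⟩ := PySem.List.bisectLeft_spec (cov.map Prod.snd) (s - 1) hpw
  rw [List.length_map] at hilen
  have htake : ∀ p ∈ cov.take i, p.2 < s - 1 := by
    intro p hp
    obtain ⟨j, hj, hje⟩ := List.getElem_of_mem hp
    have hjlen : j < cov.length := by
      have := hj; rw [List.length_take] at this; omega
    have hji : j < i := by
      have := hj; rw [List.length_take] at this; omega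
    have := hlt j (by rw [List.length_map]; exact hjlen) hji
    rw [List.getElem_map] at this
    rw [List.getElem_take] at hje
    rw [hje] at this; exact this
  have hdrop : ∀ p ∈ cov.drop i, s - 1 ≤ p.2 := by
    intro p hp
    obtain ⟨j, hj, hje⟩ := List.getElem_of_mem hp
    have hjlen : i + j < cov.length := by
      have := hj; rw [List.length_drop] at this; omega
    have := hge (i + j) (by rw [List.length_map]; exact hjlen) (by omega)
    rw [List.getElem_map] at this
    rw [List.getElem_drop] at hje
    rw [hje] at this; exact this
  have hsplitTD : cov.take i ++ cov.drop i = cov := List.take_append_drop i cov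
  have hcross : ∀ p ∈ cov.take i, ∀ q ∈ cov.drop i, p.2 + 1 < q.1 := by
    have := h.2
    rw [← hsplitTD] at this
    exact fun p hp q hq => (List.pairwise_append.mp this).2.2 p hp q hq
  have hGoodDrop : pvGood (cov.drop i) :=
    ⟨fun p hp => h.1 p (by rw [← hsplitTD]; exact List.mem_append_right _ hp),
     h.2.sublist (List.drop_sublist i cov)⟩
  obtain ⟨hgap, merged, hsplit, hmem, hns', htail⟩ :=
    pvMergeSpec (cov.drop i) s e s e hGoodDrop
      (fun p hp => by have := hdrop p hp; omega)
      (fun p hp => Or.inl rfl) hse le_rfl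
  have hmergedsub : ∀ p ∈ merged, p ∈ cov.drop i := by
    intro p hp; rw [hsplit]; exact List.mem_append_left _ hp
  have htailsub : ∀ p ∈ (pvCoverMerge (cov.drop i) s e s e).2.2.2, p ∈ cov.drop i := by
    intro p hp; rw [hsplit]; exact List.mem_append_right _ hp
  have hns'le : (pvCoverMerge (cov.drop i) s e s e).2.1 ≤ s
      ∧ s ≤ (pvCoverMerge (cov.drop i) s e s e).2.2.1
      ∧ e ≤ (pvCoverMerge (cov.drop i) s e s e).2.2.1 := by
    have h1 := (hmem s).mpr (Or.inl ⟨le_rfl, hse⟩)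
    have h2 := (hmem e).mpr (Or.inl ⟨hse, le_rfl⟩)
    exact ⟨h1.1, h1.2, h2.2⟩
  refine ⟨?_, ⟨?_, ?_⟩, ?_⟩
  · rw [hgap]
    apply List.filter_congr
    intro x hx
    have hx' := PySem.List.mem_pyRange_one.mp hx
    have hT : pvCovB x (cov.take i) = false :=
      pvCovB_false_of_gt x _ (fun q hq => by have := htake q hq; omega)
    conv_rhs => rw [← hsplitTD]
    rw [pvCovB_append, hT]
    simp
  · -- interval validity
    intro p hp
    rcases List.mem_append.mp hp with hp | hp
    · exact h.1 p (by rw [← hsplitTD]; exact List.mem_append_left _ hp)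
    · rcases List.mem_cons.mp hp with hp | hp
      · rw [hp]; simp; omega
      · exact h.1 p (by rw [← hsplitTD]; exact List.mem_append_right _ (htailsub p hp))
  · -- pairwise
    apply List.pairwise_append.mpr
    refine ⟨h.2.sublist (List.take_sublist i cov), ?_, ?_⟩
    · apply List.pairwise_cons.mpr
      refine ⟨htail, ?_⟩
      have hsub := List.sublist_append_right merged (pvCoverMerge (cov.drop i) s e s e).2.2.2
      rw [← hsplit] at hsub
      exact (h.2.sublist (List.drop_sublist i cov)).sublist hsub
    · intro p hp q hq
      rcases List.mem_cons.mp hq with hq | hq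
      · rw [hq]
        rcases hns' with h' | ⟨pm, hpm, h'⟩
        · have := htake p hp; simp; omega
        · have := hcross p hp pm (hmergedsub pm hpm); simp; omega
      · exact hcross p hp q (htailsub q hq)
  · intro x
    have hx := hmem x
    rw [pvCovB_append, pvCovB_cons]
    conv_rhs => rw [← hsplitTD]
    rw [pvCovB_append]
    conv_rhs => rw [hsplit]
    rw [pvCovB_append]
    simp only [Bool.or_eq_true, decide_eq_true_eq]
    rw [hx]
    tauto

lemma pvSetAppendRange (L : List Int) (s e : Int) :
    PySem.Set.ofList (L ++ PySem.List.pyRange s e 1)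
      = PySem.Set.ofList L ++ (PySem.List.pyRange s e 1).filter (fun y => !PySem.Set.contains (PySem.Set.ofList L) y) := by
  rw [PySem.Set.ofList_append, PySem.Set.update_eq_append_filter,
      PySem.Set.ofList_eq_self_of_nodup _ (PySem.List.nodup_pyRange_one s e)]

lemma pvMainLoop (xs : List Int) (bc : Int) :
    ∀ (L : List Int) (cov : List (Int × Int)), pvGood cov →
    (∀ x : Int, pvCovB x cov = true ↔ x ∈ L) →
    (xs.foldl (fun (st : List Int × List (Int × Int)) item =>
        let s := item - bc
        let s := if s < 1 then 1 else s
        let e := item - 1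
        if s > e then st
        else
          let r := pvCover st.2 s e
          (PySem.Set.update st.1 r.1, r.2)) (PySem.Set.ofList L, cov)).1
      = PySem.Set.ofList (xs.foldl (fun result item =>
          let start := item - bc
          let start := if start < 1 then 1 else start
          let endv := item - 1
          (PySem.List.pyRange start (endv + 1) 1).foldl (fun r i => r ++ [i]) result) L) := by
  induction xs with
  | nil => intro L cov _ _; rfl
  | cons item xs ih =>
    intro L cov hGood hMem
    rw [List.foldl_cons, List.foldl_cons]
    show (List.foldl _
        (if (if item - bc < 1 then 1 else item - bc) > item - 1 then (PySem.Set.ofList L, cov)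
         else (PySem.Set.update (PySem.Set.ofList L) (pvCover cov (if item - bc < 1 then 1 else item - bc) (item - 1)).1,
               (pvCover cov (if item - bc < 1 then 1 else item - bc) (item - 1)).2)) xs).1
      = PySem.Set.ofList (List.foldl _
          ((PySem.List.pyRange (if item - bc < 1 then 1 else item - bc) (item - 1 + 1) 1).foldl
            (fun r i => r ++ [i]) L) xs)
    rw [PySem.List.foldl_append_singleton]
    set s : Int := if item - bc < 1 then 1 else item - bc with hs
    by_cases hgt : s > item - 1
    · -- empty context window: both sides keep their state
      rw [if_pos hgt, PySem.List.pyRange_one_eq_nil (by omega : item - 1 + 1 ≤ s),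
          List.append_nil]
      exact ih L cov hGood hMem
    · rw [if_neg hgt]
      have hse : s ≤ item - 1 := by omega
      obtain ⟨hgap, hGood', hMem'⟩ := pvCoverSpec cov s (item - 1) hGood hse
      have hfil : (pvCover cov s (item - 1)).1
          = (PySem.List.pyRange s (item - 1 + 1) 1).filter
              (fun y => !PySem.Set.contains (PySem.Set.ofList L) y) := by
        rw [hgap]
        apply List.filter_congr
        intro x _
        have h1 : pvCovB x cov = PySem.Set.contains (PySem.Set.ofList L) x := by
          have hc : PySem.Set.contains (PySem.Set.ofList L) x = true ↔ x ∈ L := by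
            rw [PySem.Set.contains_iff, PySem.Set.mem_ofList]
          rcases Bool.eq_false_or_eq_true (pvCovB x cov) with h | h
          · rw [h]; symm
            rw [hc]
            exact (hMem x).mp h
          · rw [h]; symm
            rw [← Bool.not_eq_true, hc]
            intro hx
            have h2 := (hMem x).mpr hx
            rw [h] at h2
            exact Bool.false_ne_true h2
        rw [h1]
      have hnodup : ((pvCover cov s (item - 1)).1).Nodup := by
        rw [hfil]
        exact (PySem.List.nodup_pyRange_one s (item - 1 + 1)).filter _
      have hpair : (PySem.Set.update (PySem.Set.ofList L) (pvCover cov s (item - 1)).1,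
            (pvCover cov s (item - 1)).2)
          = (PySem.Set.ofList (L ++ PySem.List.pyRange s (item - 1 + 1) 1),
            (pvCover cov s (item - 1)).2) := by
        rw [PySem.Set.update_eq_append_filter,
            PySem.Set.ofList_eq_self_of_nodup _ hnodup, hfil, pvSetAppendRange,
            List.filter_filter]
        simp
      rw [hpair]
      apply ih
      · exact hGood'
      · intro x
        rw [hMem' x, List.mem_append, hMem x, PySem.List.mem_pyRange_one]
        constructor
        · rintro (h | h)
          · exact Or.inl h
          · exact Or.inr ⟨h.1, by omega⟩
        · rintro (h | h)
          · exact Or.inl h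
          · exact Or.inr ⟨h.1, by omega⟩

-- ===== VERDICT (by name: the statement is the Claim_ definition above) =====
theorem get_str_nums_before_context_spec : Claim_equal_get_str_nums_before_context := by
  intro xs bc _
  unfold Spec_get_str_nums_before_context get_str_nums_before_context get_str_nums_before_context_alt
  have h := pvMainLoop xs bc [] [] ⟨by simp, by simp⟩ (by intro x; simp [pvCovB])
  simp only [PySem.Set.ofList_nil] at h
  exact h.symm
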